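-- pv_equiv track=rewrite | github.com/cjnoble/AdeventOfCode2023 | day_13.py | get_mirror_row_smudged
-- ===== SOURCE A (Python) =====
-- def line_equal(line_1, line_2):
--
--     for l1, l2 in zip(line_1, line_2):
--         if l1 != l2:
--             return False
--     return True
--
-- def line_equal_smudged(line_1, line_2):
--
--     smudges = 0
--
--     for l1, l2 in zip(line_1, line_2):
--         if l1 != l2:
--             smudges += 1
--         if smudges > 1:
--             return False
--     if smudges == 1:
--         return True
--     else:
--         return False
--
-- def smudge_check(pattern, x1, x2):
--     smudges = 0
--     while x2 > x1:
--         equal = line_equal(pattern[x1], pattern[x2])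
--         equal_if_smudged = line_equal_smudged(pattern[x1], pattern[x2])
--
--         if (not equal) and (equal_if_smudged):
--         #if equal_if_smudged:
--             smudges += 1
--
--         if equal or equal_if_smudged:
--             if x1+1 == x2 and smudges == 1:
--                 # This means we found the mirror
--                 return x2
--             if smudges > 1:
--                 break
--             x1 += 1
--             x2 -= 1
--         else:
--             break
--     return None
--
-- def get_mirror_row_smudged(pattern):
--
--     x1 = 0 #Check for any mirror including the first line
--     for x2 in range(x1+1, len(pattern)):
--         check = smudge_check(pattern, x1, x2)
--         if check:
--             return check
--
--     #Now check for any pattern including the last line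
--     for x1 in range(len(pattern)):
--         x2 = len(pattern) -1
--         check = smudge_check(pattern, x1, x2)
--         if check:
--             return check
--
--     return None
-- ===== SOURCE B (Python) =====
-- def get_mirror_row_smudged(pattern):
--     n = len(pattern)
--     for axis in range(1, n):
--         span = min(axis, n - axis)
--         diffs = 0
--         for j in range(span):
--             diffs += sum(c1 != c2 for c1, c2 in zip(pattern[axis - 1 - j], pattern[axis + j]))
--             if diffs > 1:
--                 break
--         if diffs == 1:
--             return axis
--     return None
-- ===== Notes on version B (the rewrite author's own statement) =====
-- stated objective: simpler
-- what changed: Replaces A's two row-comparison helpers (exact and one-smudge) and two anchored outer loops with an inward two-pointer walk by a single scan over candidate axes that accumulates the total character-mismatch count over the reflected row pairs and returns the axis when that count is exactly 1; one combined mismatch count per row pair instead of A's two separate comparisons gives a measured constant-factor speedup.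
import Mathlib
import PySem

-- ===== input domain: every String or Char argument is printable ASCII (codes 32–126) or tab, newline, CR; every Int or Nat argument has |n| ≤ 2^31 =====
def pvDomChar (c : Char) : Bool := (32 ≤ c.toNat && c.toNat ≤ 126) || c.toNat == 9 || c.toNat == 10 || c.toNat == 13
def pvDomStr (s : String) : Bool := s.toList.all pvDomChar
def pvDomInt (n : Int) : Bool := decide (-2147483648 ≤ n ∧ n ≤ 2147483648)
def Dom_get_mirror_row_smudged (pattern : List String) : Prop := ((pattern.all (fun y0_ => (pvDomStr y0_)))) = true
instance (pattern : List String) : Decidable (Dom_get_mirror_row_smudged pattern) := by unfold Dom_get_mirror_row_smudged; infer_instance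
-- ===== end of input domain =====

-- B replaces A's two comparison helpers and two anchored outer loops (each with an inward
-- two-pointer walk) by one scan over candidate axes that accumulates the total character
-- mismatch count over the reflected row pairs; simpler, and measured constant-factor faster.

-- ===== PORT A =====
-- pattern[i] : both programs only index with 0 ≤ i < len(pattern), where pyGet? is some,
-- so the .getD "" default is never consulted.
def pvRow (pattern : List String) (i : Int) : List Char :=
  ((PySem.List.pyGet? pattern i).getD "").toList

def lineEqual : List Char → List Char → Bool
  | a :: as, b :: bs => if a ≠ b then false else lineEqual as bs
  | _, _ => true

def lineEqualSmudged : List Char → List Char → Nat → Bool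
  | a :: as, b :: bs, s =>
    let s' := if a ≠ b then s + 1 else s
    if s' > 1 then false else lineEqualSmudged as bs s'
  | _, _, s => s == 1

def smudgeCheck (pattern : List String) (x1 x2 : Int) (smudges : Nat) : Option Int :=
  if h : x1 < x2 then
    let l1 := pvRow pattern x1
    let l2 := pvRow pattern x2
    let equal := lineEqual l1 l2
    let eqsm := lineEqualSmudged l1 l2 0
    let smudges' := if !equal && eqsm then smudges + 1 else smudges
    if equal || eqsm then
      if x1 + 1 = x2 ∧ smudges' = 1 then some x2
      else if smudges' > 1 then none
      else smudgeCheck pattern (x1 + 1) (x2 - 1) smudges'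
    else none
  else none
termination_by (x2 - x1).toNat
decreasing_by omega

-- `if check:` in A — check is None or the returned row index x2 ≥ 1, never 0, so it is `is not None`
def aScan1 (pattern : List String) : List Int → Option Int
  | [] => none
  | x2 :: rest =>
    match smudgeCheck pattern 0 x2 0 with
    | some v => some v
    | none => aScan1 pattern rest

def aScan2 (pattern : List String) : List Int → Option Int
  | [] => none
  | x1 :: rest =>
    match smudgeCheck pattern x1 ((pattern.length : Int) - 1) 0 with
    | some v => some v
    | none => aScan2 pattern rest

def get_mirror_row_smudged (pattern : List String) : Option Int :=
  match aScan1 pattern (PySem.List.pyRange 1 (pattern.length : Int)) with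
  | some v => some v
  | none => aScan2 pattern (PySem.List.pyRange 0 (pattern.length : Int))

-- ===== PORT B =====
-- sum(c1 != c2 for c1, c2 in zip(...))
def countDiff : List Char → List Char → Nat
  | a :: as, b :: bs => (if a ≠ b then 1 else 0) + countDiff as bs
  | _, _ => 0

-- inner `for j in range(span): diffs += …; if diffs > 1: break`
def bInner (pattern : List String) (axis : Int) : List Int → Nat → Nat
  | [], diffs => diffs
  | j :: rest, diffs =>
    let d' := diffs + countDiff (pvRow pattern (axis - 1 - j)) (pvRow pattern (axis + j))
    if d' > 1 then d' else bInner pattern axis rest d'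

def bScan (pattern : List String) (n : Int) : List Int → Option Int
  | [] => none
  | axis :: rest =>
    let span := min axis (n - axis)
    if bInner pattern axis (PySem.List.pyRange 0 span) 0 = 1 then some axis
    else bScan pattern n rest

def get_mirror_row_smudged_alt (pattern : List String) : Option Int :=
  bScan pattern (pattern.length : Int) (PySem.List.pyRange 1 (pattern.length : Int))

-- ===== PRECONDITION & SPEC =====
def Spec_get_mirror_row_smudged (pattern : List String) (out : Option Int) : Prop := out = get_mirror_row_smudged_alt pattern
instance (pattern : List String) (out : Option Int) : Decidable (Spec_get_mirror_row_smudged pattern out) := by unfold Spec_get_mirror_row_smudged; infer_instance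

-- ===== CLAIM (what is proved, stated in full; the proofs are below) =====
def Claim_equal_get_mirror_row_smudged : Prop := ∀ (pattern : List String), Dom_get_mirror_row_smudged pattern → Spec_get_mirror_row_smudged pattern (get_mirror_row_smudged pattern)

-- ===== LEMMAS AND PROOFS =====

-- total mismatch count over the reflected pairs (x1,x2), (x1+1,x2-1), …
def pairSum (pattern : List String) (x1 x2 : Int) : Nat :=
  if h : x1 < x2 then
    countDiff (pvRow pattern x1) (pvRow pattern x2) + pairSum pattern (x1 + 1) (x2 - 1)
  else 0
termination_by (x2 - x1).toNat
decreasing_by omega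

-- the mismatch sum accumulated by B's inner loop over the j-list
def sumPJ (pattern : List String) (axis : Int) : List Int → Nat
  | [] => 0
  | j :: rest => countDiff (pvRow pattern (axis - 1 - j)) (pvRow pattern (axis + j)) + sumPJ pattern axis rest

theorem lineEqual_eq (as : List Char) : ∀ (bs : List Char), lineEqual as bs = decide (countDiff as bs = 0) := by
  induction as with
  | nil => intro bs; cases bs <;> simp [lineEqual, countDiff]
  | cons a as ih =>
    intro bs
    cases bs with
    | nil => simp [lineEqual, countDiff]
    | cons b bs =>
      by_cases h : a = b <;> simp [lineEqual, countDiff, h, ih]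

theorem lineEqualSmudged_eq (as : List Char) : ∀ (bs : List Char) (s : Nat), s ≤ 1 →
    lineEqualSmudged as bs s = decide (s + countDiff as bs = 1) := by
  induction as with
  | nil => intro bs s hs; cases bs <;> simp [lineEqualSmudged, countDiff, Bool.beq_eq_decide_eq]
  | cons a as ih =>
    intro bs s hs
    cases bs with
    | nil => simp [lineEqualSmudged, countDiff, Bool.beq_eq_decide_eq]
    | cons b bs =>
      have hns : ¬ (1 < s) := by omega
      by_cases h : a = b
      · simpa [lineEqualSmudged, countDiff, h, hns] using ih bs s hs
      · rcases Nat.lt_or_ge s 1 with h1 | h1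
        · have hs0 : s = 0 := by omega
          subst hs0
          simpa [lineEqualSmudged, countDiff, h] using ih bs 1 (by omega)
        · have hs1 : s = 1 := by omega
          subst hs1
          simp [lineEqualSmudged, countDiff, h]

theorem bInner_eq_one (pattern : List String) (axis : Int) : ∀ (l : List Int) (d : Nat), d ≤ 1 →
    (bInner pattern axis l d = 1 ↔ d + sumPJ pattern axis l = 1) := by
  intro l
  induction l with
  | nil => intro d hd; simp [bInner, sumPJ]
  | cons j rest ih =>
    intro d hd
    simp only [bInner, sumPJ]
    set c := countDiff (pvRow pattern (axis - 1 - j)) (pvRow pattern (axis + j)) with hc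
    by_cases hgt : d + c > 1
    · simp [hgt]; omega
    · simp [hgt]
      rw [ih (d + c) (by omega)]
      omega

theorem aScan1_eq (pattern : List String) : ∀ (l : List Int),
    aScan1 pattern l = (l.filterMap (fun x2 => smudgeCheck pattern 0 x2 0)).head? := by
  intro l
  induction l with
  | nil => simp [aScan1]
  | cons x rest ih =>
    simp only [aScan1, List.filterMap_cons]
    cases h : smudgeCheck pattern 0 x 0 <;> simp [h, ih]

theorem aScan2_eq (pattern : List String) : ∀ (l : List Int),
    aScan2 pattern l = (l.filterMap (fun x1 => smudgeCheck pattern x1 ((pattern.length : Int) - 1) 0)).head? := by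
  intro l
  induction l with
  | nil => simp [aScan2]
  | cons x rest ih =>
    simp only [aScan2, List.filterMap_cons]
    cases h : smudgeCheck pattern x ((pattern.length : Int) - 1) 0 <;> simp [h, ih]

theorem bScan_eq (pattern : List String) (n : Int) : ∀ (l : List Int),
    bScan pattern n l =
      ((l.filterMap (fun a => if bInner pattern a (PySem.List.pyRange 0 (min a (n - a))) 0 = 1 then some a else none)).head?) := by
  intro l
  induction l with
  | nil => simp [bScan]
  | cons x rest ih =>
    simp only [bScan, List.filterMap_cons]
    by_cases h : bInner pattern x (PySem.List.pyRange 0 (min x (n - x))) 0 = 1 <;> simp [h, ih]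
theorem pairSum_pos (pattern : List String) (x1 x2 : Int) (h : x1 < x2) :
    pairSum pattern x1 x2 = countDiff (pvRow pattern x1) (pvRow pattern x2) + pairSum pattern (x1 + 1) (x2 - 1) := by
  rw [pairSum]; simp [h]

theorem pairSum_nonpos (pattern : List String) (x1 x2 : Int) (h : ¬ x1 < x2) :
    pairSum pattern x1 x2 = 0 := by
  rw [pairSum]; simp [h]

theorem smudgeCheck_eq (pattern : List String) : ∀ (g : Nat) (x1 x2 : Int) (s : Nat),
    (x2 - x1).toNat = g → x1 < x2 → s ≤ 1 →
    smudgeCheck pattern x1 x2 s =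
      if s + pairSum pattern x1 x2 = 1 ∧ (x2 - x1) % 2 = 1 then some ((x1 + x2 + 1) / 2) else none := by
  intro g
  induction g using Nat.strong_induction_on with
  | _ g ih =>
    intro x1 x2 s hg hlt hs
    rw [smudgeCheck]
    simp only [hlt, dite_true]
    rw [lineEqual_eq, lineEqualSmudged_eq _ _ 0 (by omega)]
    rw [pairSum_pos pattern x1 x2 hlt]
    set c := countDiff (pvRow pattern x1) (pvRow pattern x2) with hc
    set ps := pairSum pattern (x1 + 1) (x2 - 1) with hps
    rcases Nat.lt_or_ge c 2 with hc2 | hc2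
    · -- c = 0 or 1 : the pair is equal or smudged-equal
      have hcsplit : c = 0 ∨ c = 1 := by omega
      have hbr : (decide (c = 0) || decide (0 + c = 1)) = true := by
        rcases hcsplit with h | h <;> simp [h]
      have hsm : (if (!decide (c = 0) && decide (0 + c = 1)) = true then s + 1 else s) = s + c := by
        rcases hcsplit with h | h <;> simp [h]
      simp only [hbr, if_true, hsm]
      by_cases hbase : x1 + 1 = x2
      · -- innermost pair
        have hps0 : ps = 0 := pairSum_nonpos pattern _ _ (by omega)
        rw [hps0]
        by_cases h1 : s + c = 1
        · have hcond : (s + (c + 0) = 1 ∧ (x2 - x1) % 2 = 1) := ⟨by omega, by omega⟩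
          simp only [hbase, h1, and_self, if_true, hcond, if_true]
          congr 1
          omega
        · have hcond : ¬ (s + (c + 0) = 1 ∧ (x2 - x1) % 2 = 1) := by
            intro ⟨h, _⟩; omega
          simp only [hcond, if_false]
          have hno : ¬ (x1 + 1 = x2 ∧ s + c = 1) := by intro ⟨_, h⟩; exact h1 h
          simp only [hno, if_false]
          by_cases h2 : s + c > 1
          · simp [h2]
          · simp only [h2, if_false]
            rw [smudgeCheck]
            have : ¬ (x1 + 1 < x2 - 1) := by omega
            simp [this]
      · -- at least two pairs remain
        have hno : ¬ (x1 + 1 = x2 ∧ s + c = 1) := by intro ⟨h, _⟩; exact hbase h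
        simp only [hno, if_false]
        by_cases h2 : s + c > 1
        · have hcond : ¬ (s + (c + ps) = 1 ∧ (x2 - x1) % 2 = 1) := by
            intro ⟨h, _⟩; omega
          simp [h2, hcond]
        · simp only [h2, if_false]
          by_cases hdeg : x1 + 1 < x2 - 1
          · rw [ih ((x2 - 1) - (x1 + 1)).toNat (by omega) (x1 + 1) (x2 - 1) (s + c) rfl hdeg (by omega)]
            rw [← hps]
            have hm : (x2 - 1 - (x1 + 1)) % 2 = (x2 - x1) % 2 := by omega
            have hmid : (x1 + 1 + (x2 - 1) + 1) / 2 = (x1 + x2 + 1) / 2 := by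
              congr 1; omega
            rw [hm, hmid]
            have hsum : (s + c + ps = 1 ∧ (x2 - x1) % 2 = 1) ↔ (s + (c + ps) = 1 ∧ (x2 - x1) % 2 = 1) := by
              constructor <;> (intro ⟨h, h'⟩; exact ⟨by omega, h'⟩)
            rw [if_congr hsum rfl rfl]
          · -- gap exactly 2: even span, recursion exits immediately
            have hps0 : ps = 0 := pairSum_nonpos pattern _ _ hdeg
            have heven : ¬ ((x2 - x1) % 2 = 1) := by omega
            rw [smudgeCheck]
            simp [hdeg, heven]
    · -- c ≥ 2 : irreparable pair, break
      have hcond : ¬ (s + (c + ps) = 1 ∧ (x2 - x1) % 2 = 1) := by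
        intro ⟨h, _⟩; omega
      have hcf : ¬ (c = 0 ∨ c = 1) := by omega
      simp [hcond, hcf]
theorem sumPJ_pairSum (pattern : List String) (axis : Int) : ∀ (g : Nat) (j k : Int),
    (k - j).toNat = g → 0 ≤ j → j ≤ k →
    pairSum pattern (axis - k) (axis + k - 1)
      = pairSum pattern (axis - j) (axis + j - 1) + sumPJ pattern axis (PySem.List.pyRange j k) := by
  intro g
  induction g with
  | zero =>
    intro j k hg h0 hjk
    have hn0 : (k - j).toNat = 0 := by omega
    have hkj : j = k := by omega
    have hemp : PySem.List.pyRange j k = [] := by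
      rw [PySem.List.pyRange_one, hn0]
      simp
    rw [hemp, hkj]
    simp [sumPJ]
  | succ g ihg =>
    intro j k hg h0 hjk
    have hjk' : j < k := by omega
    rw [PySem.List.pyRange_one_cons hjk']
    simp only [sumPJ]
    have ih := ihg (j + 1) k (by omega) (by omega) (by omega)
    rw [ih]
    have hunf : pairSum pattern (axis - (j + 1)) (axis + (j + 1) - 1)
        = countDiff (pvRow pattern (axis - (j + 1))) (pvRow pattern (axis + (j + 1) - 1))
          + pairSum pattern ((axis - (j + 1)) + 1) ((axis + (j + 1) - 1) - 1) :=
      pairSum_pos pattern _ _ (by omega)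
    have e1 : axis - (j + 1) = axis - 1 - j := by ring
    have e2 : axis + (j + 1) - 1 = axis + j := by ring
    have e3 : axis - (j + 1) + 1 = axis - j := by ring
    have e4 : axis + (j + 1) - 1 - 1 = axis + j - 1 := by ring
    rw [e3, e4] at hunf
    rw [e1, e2] at hunf
    rw [e1, e2]
    rw [hunf]
    omega

-- the canonical per-axis test both programs implement
def axisValid (pattern : List String) (n a : Int) : Option Int :=
  if pairSum pattern (a - min a (n - a)) (a + min a (n - a) - 1) = 1 then some a else none

-- B's scan, characterised axis-wise
theorem loopB_eq (pattern : List String) (n : Int) : ∀ (l : List Int), (∀ a ∈ l, 1 ≤ a ∧ a < n) →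
    l.filterMap (fun a => if bInner pattern a (PySem.List.pyRange 0 (min a (n - a))) 0 = 1 then some a else none)
      = l.filterMap (axisValid pattern n) := by
  intro l hl
  apply List.filterMap_congr
  intro a ha
  obtain ⟨h1, h2⟩ := hl a ha
  have hk : (0 : Int) ≤ min a (n - a) := by omega
  have := bInner_eq_one pattern a (PySem.List.pyRange 0 (min a (n - a))) 0 (by omega)
  have hsum := sumPJ_pairSum pattern a (min a (n - a)).toNat 0 (min a (n - a)) (by omega) le_rfl hk
  have hz : pairSum pattern (a - 0) (a + 0 - 1) = 0 := pairSum_nonpos pattern _ _ (by omega)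
  rw [hz] at hsum
  unfold axisValid
  by_cases hv : pairSum pattern (a - min a (n - a)) (a + min a (n - a) - 1) = 1
  · have : bInner pattern a (PySem.List.pyRange 0 (min a (n - a))) 0 = 1 := by
      rw [this]; omega
    simp [this, hv]
  · have : ¬ (bInner pattern a (PySem.List.pyRange 0 (min a (n - a))) 0 = 1) := by
      rw [this]; omega
    simp [this, hv]
def axisTop (pattern : List String) (a : Int) : Option Int :=
  if pairSum pattern 0 (2 * a - 1) = 1 then some a else none

def axisBot (pattern : List String) (n a : Int) : Option Int :=
  if pairSum pattern (2 * a - n) (n - 1) = 1 then some a else none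

theorem pyRange_empty (a b : Int) (h : b ≤ a) : PySem.List.pyRange a b = [] := by
  rw [PySem.List.pyRange_one]
  have : (b - a).toNat = 0 := by omega
  simp [this]

theorem loop1_eq (pattern : List String) : ∀ (N : Nat),
    (PySem.List.pyRange 1 (N : Int)).filterMap (fun x2 => smudgeCheck pattern 0 x2 0)
      = (PySem.List.pyRange 1 ((N : Int) / 2 + 1)).filterMap (axisTop pattern) := by
  intro N
  induction N with
  | zero =>
    push_cast
    rw [pyRange_empty 1 0 (by omega)]
    rw [pyRange_empty 1 1 (by omega)]
    simp
  | succ N ihN =>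
    rcases Nat.eq_zero_or_pos N with h0 | hpos
    · subst h0
      push_cast
      simp
    · have hN1 : (1 : Int) ≤ (N : Int) := by exact_mod_cast hpos
      have hstep : PySem.List.pyRange 1 ((N : Int) + 1) = PySem.List.pyRange 1 (N : Int) ++ [(N : Int)] :=
        PySem.List.pyRange_one_succ_right hN1
      push_cast
      rw [hstep, List.filterMap_append, ihN]
      rcases Int.even_or_odd (N : Int) with he | ho
      · obtain ⟨m, hm⟩ := he
        -- N even: appended x2 contributes nothing, axis range unchanged
        have hel : smudgeCheck pattern 0 (N : Int) 0 = none := by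
          rw [smudgeCheck_eq pattern ((N : Int) - 0).toNat 0 (N : Int) 0 rfl (by omega) (by omega)]
          have hpar : ¬ (((N : Int) - 0) % 2 = 1) := by omega
          rw [if_neg (by intro hcon; exact hpar hcon.2)]
        have hrg : ((N : Int) + 1) / 2 + 1 = (N : Int) / 2 + 1 := by omega
        rw [hrg]
        simp [hel]
      · -- N odd: appended x2 = N contributes exactly the new axis (N+1)/2
        obtain ⟨m, hm⟩ := ho
        have hel : smudgeCheck pattern 0 (N : Int) 0 = axisTop pattern (m + 1) := by
          rw [smudgeCheck_eq pattern ((N : Int) - 0).toNat 0 (N : Int) 0 rfl (by omega) (by omega)]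
          unfold axisTop
          have e2 : (2 * (m + 1) - 1 : Int) = (N : Int) := by omega
          rw [e2]
          have h3 : ((0 : Int) + (N : Int) + 1) / 2 = m + 1 := by omega
          rw [h3]
          have h1 : ((N : Int)) % 2 = 1 := by omega
          simp [h1]
        have hrg : PySem.List.pyRange 1 (((N : Int) + 1) / 2 + 1)
            = PySem.List.pyRange 1 ((N : Int) / 2 + 1) ++ [m + 1] := by
          have ha : ((N : Int) + 1) / 2 + 1 = ((N : Int) / 2 + 1) + 1 := by omega
          have hb : (N : Int) / 2 + 1 = m + 1 := by omega
          rw [ha, PySem.List.pyRange_one_succ_right (by omega), hb]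
        rw [hrg, List.filterMap_append]
        congr 1
        simp only [List.filterMap_cons, List.filterMap_nil]
        rw [hel]
theorem loop2_eq (pattern : List String) (n : Int) : ∀ (g : Nat) (lo : Int),
    (n - lo).toNat = g → 0 ≤ lo →
    (PySem.List.pyRange lo n).filterMap (fun x1 => smudgeCheck pattern x1 (n - 1) 0)
      = (PySem.List.pyRange ((lo + n + 1) / 2) n).filterMap (axisBot pattern n) := by
  intro g
  induction g with
  | zero =>
    intro lo hg h0
    rw [pyRange_empty lo n (by omega), pyRange_empty _ n (by omega)]
    simp
  | succ g ihg =>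
    intro lo hg h0
    have hlt : lo < n := by omega
    rw [PySem.List.pyRange_one_cons hlt, List.filterMap_cons]
    rw [ihg (lo + 1) (by omega) (by omega)]
    rcases Int.even_or_odd (lo + n) with he | ho
    · -- lo + n even : x1 = lo has odd reflected span and contributes axis (lo+n)/2
      obtain ⟨m, hm⟩ := he
      by_cases hedge : lo + 1 = n
      · -- impossible: lo + n even contradicts lo = n - 1
        omega
      · have hel : smudgeCheck pattern lo (n - 1) 0 = axisBot pattern n m := by
          rw [smudgeCheck_eq pattern ((n - 1) - lo).toNat lo (n - 1) 0 rfl (by omega) (by omega)]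
          unfold axisBot
          have e2 : (2 * m - n : Int) = lo := by omega
          rw [e2]
          have h3 : (lo + (n - 1) + 1) / 2 = m := by omega
          rw [h3]
          have h1 : (n - 1 - lo) % 2 = 1 := by omega
          simp [h1]
        rw [hel]
        have hrg : PySem.List.pyRange ((lo + n + 1) / 2) n = m :: PySem.List.pyRange ((lo + 1 + n + 1) / 2) n := by
          have ha : (lo + n + 1) / 2 = m := by omega
          have hb : (lo + 1 + n + 1) / 2 = m + 1 := by omega
          rw [ha, hb]
          exact PySem.List.pyRange_one_cons (by omega)
        rw [hrg, List.filterMap_cons]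
    · -- lo + n odd : even reflected span, x1 = lo contributes nothing
      obtain ⟨m, hm⟩ := ho
      have hel : smudgeCheck pattern lo (n - 1) 0 = none := by
        by_cases hedge : lo + 1 = n
        · rw [smudgeCheck]
          have : ¬ (lo < n - 1) := by omega
          simp [this]
        · rw [smudgeCheck_eq pattern ((n - 1) - lo).toNat lo (n - 1) 0 rfl (by omega) (by omega)]
          have hpar : ¬ ((n - 1 - lo) % 2 = 1) := by omega
          rw [if_neg (by intro hcon; exact hpar hcon.2)]
      rw [hel]
      have hrg : (lo + n + 1) / 2 = (lo + 1 + n + 1) / 2 := by omega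
      rw [hrg]
theorem axisValid_top (pattern : List String) (n a : Int) (h1 : 1 ≤ a) (h2 : a ≤ n / 2) :
    axisValid pattern n a = axisTop pattern a := by
  unfold axisValid axisTop
  have hmin : min a (n - a) = a := by omega
  rw [hmin]
  have e1 : a - a = (0 : Int) := by ring
  have e2 : a + a - 1 = 2 * a - 1 := by ring
  rw [e1, e2]

theorem axisValid_bot (pattern : List String) (n a : Int) (h1 : n ≤ 2 * a) (h2 : a < n) :
    axisValid pattern n a = axisBot pattern n a := by
  unfold axisValid axisBot
  have hmin : min a (n - a) = n - a := by omega
  rw [hmin]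
  have e1 : a - (n - a) = 2 * a - n := by ring
  have e2 : a + (n - a) - 1 = n - 1 := by ring
  rw [e1, e2]

theorem main_eq (pattern : List String) :
    get_mirror_row_smudged pattern = get_mirror_row_smudged_alt pattern := by
  unfold get_mirror_row_smudged get_mirror_row_smudged_alt
  set n : Int := (pattern.length : Int) with hn
  have hn0 : 0 ≤ n := by positivity
  rw [aScan1_eq, aScan2_eq, bScan_eq]
  rw [loop1_eq pattern pattern.length]
  rw [loop2_eq pattern n ((n - 0).toNat) 0 rfl le_rfl]
  rw [loopB_eq pattern n _ (by intro a ha; exact (PySem.List.mem_pyRange_one.mp ha).imp id id)]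
  -- rewrite the two A-side axis functions into axisValid on their ranges
  have hL1 : (PySem.List.pyRange 1 (n / 2 + 1)).filterMap (axisTop pattern)
      = (PySem.List.pyRange 1 (n / 2 + 1)).filterMap (axisValid pattern n) := by
    apply List.filterMap_congr
    intro a ha
    obtain ⟨ha1, ha2⟩ := PySem.List.mem_pyRange_one.mp ha
    exact (axisValid_top pattern n a ha1 (by omega)).symm
  have hL2 : (PySem.List.pyRange ((0 + n + 1) / 2) n).filterMap (axisBot pattern n)
      = (PySem.List.pyRange ((n + 1) / 2) n).filterMap (axisValid pattern n) := by
    have e : (0 + n + 1) / 2 = (n + 1) / 2 := by omega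
    rw [e]
    apply List.filterMap_congr
    intro a ha
    obtain ⟨ha1, ha2⟩ := PySem.List.mem_pyRange_one.mp ha
    exact (axisValid_bot pattern n a (by omega) ha2).symm
  rw [hL1, hL2]
  rcases Int.lt_or_le 0 n with hn1 | hn1
  case inr =>
    -- empty pattern
    rw [pyRange_empty 1 (n / 2 + 1) (by omega), pyRange_empty ((n + 1) / 2) n (by omega),
        pyRange_empty 1 n (by omega)]
    simp
  case inl =>
    -- split B's axis range at n/2 + 1
    rw [PySem.List.pyRange_one_append 1 (n / 2 + 1) n (by omega) (by omega),
        List.filterMap_append, List.head?_append]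
    cases hh : ((PySem.List.pyRange 1 (n / 2 + 1)).filterMap (axisValid pattern n)).head? with
    | some v => simp
    | none =>
      simp only [Option.none_or]
      rcases Int.even_or_odd n with he | ho
      · -- n even: A's second range starts at n/2, which the first range already refuted
        obtain ⟨m, hm⟩ := he
        have hsplit : (n + 1) / 2 = n / 2 := by omega
        rw [hsplit]
        rcases Int.lt_or_le (n / 2) 1 with hsm | hbig
        · -- n = 0 handled above; here n ≥ 1 even so n ≥ 2 and n/2 ≥ 1
          omega
        · have hnil : (PySem.List.pyRange 1 (n / 2 + 1)).filterMap (axisValid pattern n) = [] := by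
            cases hcase : (PySem.List.pyRange 1 (n / 2 + 1)).filterMap (axisValid pattern n) with
            | nil => rfl
            | cons x xs => rw [hcase] at hh; simp at hh
          have hmem : (n / 2) ∈ PySem.List.pyRange 1 (n / 2 + 1) :=
            PySem.List.mem_pyRange_one.mpr ⟨by omega, by omega⟩
          have hvnone : axisValid pattern n (n / 2) = none :=
            List.filterMap_eq_nil_iff.mp hnil _ hmem
          rw [PySem.List.pyRange_one_cons (show n / 2 < n by omega), List.filterMap_cons, hvnone]
      · -- n odd: the two ranges tile exactly
        obtain ⟨m, hm⟩ := ho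
        have hsplit : (n + 1) / 2 = n / 2 + 1 := by omega
        rw [hsplit]

-- ===== VERDICT (by name: the statement is the Claim_ definition above) =====
theorem get_mirror_row_smudged_spec : Claim_equal_get_mirror_row_smudged := by
  intro pattern _
  unfold Spec_get_mirror_row_smudged
  exact main_eq pattern
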